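-- pv_equiv track=rewrite | github.com/tomfirthy314-bot/DCF-speed-model | normaliser/normaliser.py | _select_base_year
-- ===== SOURCE A (Python) =====
-- def _select_base_year(years: list, years_data: dict) -> str | None:
--     """Return the most recent year that has revenue, ebit, and capex."""
--     for y in years:
--         d = years_data[y]
--         if d.get("revenue") and d.get("ebit") is not None and d.get("capex") is not None:
--             return y
--     # Relax: accept any year with just revenue
--     for y in years:
--         if years_data[y].get("revenue"):
--             return y
--     return None
-- ===== SOURCE B (Python) =====
-- def _select_base_year(years: list, years_data: dict) -> str | None:
--     """Single pass: return first year with revenue+ebit+capex; else first with revenue."""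
--     fallback = None
--     for y in years:
--         d = years_data[y]
--         if d.get("revenue") and d.get("ebit") is not None and d.get("capex") is not None:
--             return y
--         if fallback is None and d.get("revenue"):
--             fallback = y
--     return fallback
-- ===== Notes on version B (the rewrite author's own statement) =====
-- stated objective: alternative
-- what changed: Fuses A's two sequential scans into a single pass that records the first revenue-only year as a fallback while searching for a strict match.
import Mathlib
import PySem

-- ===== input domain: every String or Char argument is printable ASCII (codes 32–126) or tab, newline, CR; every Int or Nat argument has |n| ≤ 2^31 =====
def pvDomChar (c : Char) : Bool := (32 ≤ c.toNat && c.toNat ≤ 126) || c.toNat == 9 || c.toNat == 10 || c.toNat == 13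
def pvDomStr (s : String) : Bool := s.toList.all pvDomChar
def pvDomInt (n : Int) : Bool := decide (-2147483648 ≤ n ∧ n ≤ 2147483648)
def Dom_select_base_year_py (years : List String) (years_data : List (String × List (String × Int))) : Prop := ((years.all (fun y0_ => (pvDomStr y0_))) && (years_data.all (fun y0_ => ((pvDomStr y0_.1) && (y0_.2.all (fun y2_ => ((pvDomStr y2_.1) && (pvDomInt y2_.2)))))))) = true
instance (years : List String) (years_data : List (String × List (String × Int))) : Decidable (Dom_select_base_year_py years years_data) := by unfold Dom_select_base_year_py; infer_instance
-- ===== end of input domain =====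

-- B fuses A's two sequential scans into one pass carrying a fallback candidate; return values proved equal wherever A does not raise.

-- shared primitives: dict lookup (first match in the association list) and d.get(k) on the inner dict
def pvGetYear (years_data : List (String × List (String × Int))) (y : String) : Option (List (String × Int)) :=
  (years_data.find? (fun p => p.1 == y)).map (·.2)

def pvGetField (d : List (String × Int)) (k : String) : Option Int :=
  (d.find? (fun p => p.1 == k)).map (·.2)

-- truthiness of d.get("revenue") (None and 0 are falsy)
def pvTruthy (o : Option Int) : Bool :=
  match o with
  | none => false
  | some v => v != 0

def pvStrict (d : List (String × Int)) : Bool :=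
  pvTruthy (pvGetField d "revenue") && (pvGetField d "ebit").isSome && (pvGetField d "capex").isSome

-- ===== PORT A =====
-- first loop of A: first year whose record has truthy revenue and non-None ebit and capex
def aLoop1 (years : List String) (years_data : List (String × List (String × Int))) : Option String :=
  match years with
  | [] => none
  | y :: rest =>
    match pvGetYear years_data y with
    | none => none   -- KeyError in Python; excluded by Pre_
    | some d => if pvStrict d then some y else aLoop1 rest years_data

-- second loop of A: first year with truthy revenue
def aLoop2 (years : List String) (years_data : List (String × List (String × Int))) : Option String :=
  match years with
  | [] => none
  | y :: rest =>
    match pvGetYear years_data y with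
    | none => none   -- KeyError in Python; excluded by Pre_
    | some d => if pvTruthy (pvGetField d "revenue") then some y else aLoop2 rest years_data

def select_base_year_py (years : List String) (years_data : List (String × List (String × Int))) : Option String :=
  match aLoop1 years years_data with
  | some y => some y
  | none => aLoop2 years years_data

-- ===== PORT B =====
-- single pass with a fallback accumulator
def bLoop (years : List String) (years_data : List (String × List (String × Int))) (fallback : Option String) : Option String :=
  match years with
  | [] => fallback
  | y :: rest =>
    match pvGetYear years_data y with
    | none => none   -- KeyError in Python; excluded by Pre_
    | some d =>
      if pvStrict d then some y
      else bLoop rest years_data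
        (if fallback.isNone && pvTruthy (pvGetField d "revenue") then some y else fallback)

def select_base_year_py_alt (years : List String) (years_data : List (String × List (String × Int))) : Option String :=
  bLoop years years_data none

-- ===== PRECONDITION & SPEC =====
-- Pre_ excludes exactly the inputs on which Python A raises KeyError: a listed year missing from years_data.
def Pre_select_base_year_py (years : List String) (years_data : List (String × List (String × Int))) : Prop :=
  ∀ y ∈ years, (pvGetYear years_data y).isSome = true
instance (years : List String) (years_data : List (String × List (String × Int))) : Decidable (Pre_select_base_year_py years years_data) := by unfold Pre_select_base_year_py; infer_instance

def pvWitness_select_base_year_py : List String × (List (String × List (String × Int))) :=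
  (["2023", "2022"], [("2023", [("revenue", 5), ("ebit", 1)]), ("2022", [("revenue", 3), ("ebit", 2), ("capex", 0)])])

def Spec_select_base_year_py (years : List String) (years_data : List (String × List (String × Int))) (out : Option String) : Prop := out = select_base_year_py_alt years years_data
instance (years : List String) (years_data : List (String × List (String × Int))) (out : Option String) : Decidable (Spec_select_base_year_py years years_data out) := by unfold Spec_select_base_year_py; infer_instance

-- ===== CLAIM (what is proved, stated in full; the proofs are below) =====
def Claim_equal_select_base_year_py : Prop := ∀ (years : List String) (years_data : List (String × List (String × Int))), Dom_select_base_year_py years years_data → Pre_select_base_year_py years years_data → Spec_select_base_year_py years years_data (select_base_year_py years years_data)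

-- ===== LEMMAS AND PROOFS =====
-- invariant of the fused loop: it yields the first strict year, else the fallback, else the first revenue year
theorem bLoop_eq (years : List String) (years_data : List (String × List (String × Int)))
    (fallback : Option String)
    (h : ∀ y ∈ years, (pvGetYear years_data y).isSome = true) :
    bLoop years years_data fallback =
      match aLoop1 years years_data with
      | some y => some y
      | none => match fallback with
        | some f => some f
        | none => aLoop2 years years_data := by
  induction years generalizing fallback with
  | nil => cases fallback <;> simp [bLoop, aLoop1, aLoop2]
  | cons y rest ih =>
    have hy : (pvGetYear years_data y).isSome = true := h y (List.mem_cons_self ..)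
    have hrest : ∀ z ∈ rest, (pvGetYear years_data z).isSome = true :=
      fun z hz => h z (List.mem_cons_of_mem _ hz)
    obtain ⟨d, hd⟩ := Option.isSome_iff_exists.mp hy
    rw [bLoop, aLoop1, aLoop2, hd]
    dsimp only
    by_cases hs : pvStrict d
    · have hw : pvTruthy (pvGetField d "revenue") = true := by
        unfold pvStrict at hs
        exact (Bool.and_eq_true_iff.mp (Bool.and_eq_true_iff.mp hs).1).1
      simp [hs]
    · rw [if_neg hs, if_neg hs, ih _ hrest]
      cases fallback with
      | some f => simp
      | none =>
        by_cases hw : pvTruthy (pvGetField d "revenue") = true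
        · simp only [hw, Option.isNone_none, Bool.true_and, if_true]
        · simp [hw]

-- ===== VERDICT (by name: the statement is the Claim_ definition above) =====
theorem select_base_year_py_spec : Claim_equal_select_base_year_py := by
  intro years years_data _ hpre
  unfold Spec_select_base_year_py select_base_year_py select_base_year_py_alt
  rw [bLoop_eq years years_data none hpre]
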